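-- pv_equiv track=rewrite | github.com/allensallinger/staysharp_solutions | strings/strings_difference.py | singleMapCounting
-- ===== SOURCE A (Python) =====
-- from collections import defaultdict
--
-- def singleMapCounting(s1, s2):
--   m = defaultdict(int)
--
--   if len(s1) > len(s2):
--     for c in s1:
--       m[c] += 1
--
--     for c in s2:
--       m[c] -= 1
--
--   else:
--     for c in s2:
--       m[c] += 1
--
--     for c in s1:
--       m[c] -= 1
--
--   for k in m:
--     if m[k] != 0:
--       return k
--
--   return "same"
-- ===== SOURCE B (Python) =====
-- from collections import Counter
--
-- def singleMapCounting(s1, s2):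
--   long, short = (s1, s2) if len(s1) > len(s2) else (s2, s1)
--   c1 = Counter(long)
--   c2 = Counter(short)
--   for ch in long + short:
--     if c1[ch] != c2[ch]:
--       return ch
--   return "same"
-- ===== Notes on version B (the rewrite author's own statement) =====
-- stated objective: alternative
-- what changed: Instead of building one net-difference defaultdict (increment long, decrement short) and scanning its keys, B builds two independent Counters and scans the concatenation long+short for the first character whose two counts differ.
import Mathlib
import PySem

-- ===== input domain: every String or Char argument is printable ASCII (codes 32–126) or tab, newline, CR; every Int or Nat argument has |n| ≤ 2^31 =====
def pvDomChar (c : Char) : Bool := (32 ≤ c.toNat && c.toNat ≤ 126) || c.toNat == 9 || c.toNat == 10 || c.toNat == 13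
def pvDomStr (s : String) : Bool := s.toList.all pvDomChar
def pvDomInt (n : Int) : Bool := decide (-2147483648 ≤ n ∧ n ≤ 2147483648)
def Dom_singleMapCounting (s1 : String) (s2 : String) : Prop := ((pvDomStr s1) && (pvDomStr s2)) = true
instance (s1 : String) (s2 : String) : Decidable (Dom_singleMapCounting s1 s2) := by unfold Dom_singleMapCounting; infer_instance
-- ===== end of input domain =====

-- B replaces A's single net-difference map (increment over the long string, decrement over
-- the short one, then scan the dict's keys) by two independent Counters and a scan of the
-- concatenation long+short for the first character whose two counts differ; same cost.

-- ===== PORT A =====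
def singleMapCounting (s1 : String) (s2 : String) : String :=
  let m : PySem.Dict Char Int :=
    if PySem.Str.len s1 > PySem.Str.len s2 then
      s2.toList.foldl (fun d c => d.modify c 0 (· - 1))
        (s1.toList.foldl (fun d c => d.modify c 0 (· + 1)) (PySem.Dict.empty : PySem.Dict Char Int))
    else
      s1.toList.foldl (fun d c => d.modify c 0 (· - 1))
        (s2.toList.foldl (fun d c => d.modify c 0 (· + 1)) (PySem.Dict.empty : PySem.Dict Char Int))
  match m.keys.find? (fun k => decide (m.getD k 0 ≠ 0)) with
  | some k => String.mk [k]
  | none => "same"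

-- ===== PORT B =====
def singleMapCounting_alt (s1 : String) (s2 : String) : String :=
  let p := if PySem.Str.len s1 > PySem.Str.len s2 then (s1, s2) else (s2, s1)
  let c1 := PySem.Dict.counter p.1.toList
  let c2 := PySem.Dict.counter p.2.toList
  match (p.1.toList ++ p.2.toList).find? (fun ch => c1.getD ch 0 != c2.getD ch 0) with
  | some ch => String.mk [ch]
  | none => "same"

-- ===== PRECONDITION & SPEC =====
def Spec_singleMapCounting (s1 : String) (s2 : String) (out : String) : Prop := out = singleMapCounting_alt s1 s2
instance (s1 : String) (s2 : String) (out : String) : Decidable (Spec_singleMapCounting s1 s2 out) := by unfold Spec_singleMapCounting; infer_instance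

-- ===== CLAIM (what is proved, stated in full; the proofs are below) =====
def Claim_equal_singleMapCounting : Prop := ∀ (s1 : String) (s2 : String), Dom_singleMapCounting s1 s2 → Spec_singleMapCounting s1 s2 (singleMapCounting s1 s2)

-- ===== LEMMAS AND PROOFS =====

-- The decrement loop subtracts the count (mirror of PySem.Dict.getD_foldl_modify_add_one).
theorem getD_foldl_modify_sub_one (l : List Char) (d : PySem.Dict Char Int) (v : Char) :
    (l.foldl (fun d x => d.modify x 0 (· - 1)) d).getD v 0 = d.getD v 0 - l.count v := by
  induction l generalizing d with
  | nil => simp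
  | cons x xs ih =>
    simp only [List.foldl_cons, ih, PySem.Dict.getD_modify, List.count_cons]
    split_ifs with h h2 h2 <;> simp_all [beq_iff_eq] <;> ring

-- Removing an element that fails the predicate does not change the first match.
theorem find?_filter_ne {α : Type} [BEq α] [LawfulBEq α] (s : List α) (x : α) (p : α → Bool)
    (hx : p x = false) : (s.filter (fun y => !(y == x))).find? p = s.find? p := by
  induction s with
  | nil => rfl
  | cons y ys ih =>
    by_cases hy : y = x
    · subst hy
      simp only [List.filter_cons, beq_self_eq_true, Bool.not_true, if_neg, Bool.false_eq_true,
        not_false_eq_true, List.find?_cons, hx, ih]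
    · have : ((!(y == x)) = true) := by simp [hy]
      simp only [List.filter_cons, this, if_pos, List.find?_cons]
      cases hpy : p y <;> simp [ih]

theorem find?_discard {α : Type} [BEq α] [LawfulBEq α] (s : List α) (x : α) (p : α → Bool)
    (hx : p x = false) : (PySem.Set.discard s x).find? p = s.find? p := by
  have h := find?_filter_ne s x p hx
  simpa [PySem.Set.discard] using h

-- First match over the deduplicated list equals first match over the list itself.
theorem find?_ofList {α : Type} [BEq α] [LawfulBEq α] (l : List α) (p : α → Bool) :
    (PySem.Set.ofList l).find? p = l.find? p := by
  induction l with
  | nil => rfl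
  | cons x xs ih =>
    rw [PySem.Set.ofList_cons]
    simp only [List.find?_cons]
    cases hx : p x
    · rw [find?_discard _ _ _ hx, ih]
    · rfl

-- Same predicate, only evaluated through different bookkeeping.
theorem find?_congr {α : Type} (l : List α) (p q : α → Bool) (h : ∀ x, p x = q x) :
    l.find? p = l.find? q := by
  induction l with
  | nil => rfl
  | cons x xs ih => simp only [List.find?_cons, h, ih]

-- The core of the claim, for an arbitrary (long, short) pair of character lists.
theorem core (L S : List Char) :
    (match ((S.foldl (fun d c => d.modify c 0 (· - 1))
              (L.foldl (fun d c => d.modify c 0 (· + 1)) (PySem.Dict.empty : PySem.Dict Char Int))).keys.find?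
        (fun k => decide ((S.foldl (fun d c => d.modify c 0 (· - 1))
              (L.foldl (fun d c => d.modify c 0 (· + 1)) (PySem.Dict.empty : PySem.Dict Char Int))).getD k 0 ≠ 0)) : Option Char) with
      | some k => String.mk [k]
      | none => "same") =
    (match ((L ++ S).find? (fun ch =>
        (PySem.Dict.counter L).getD ch 0 != (PySem.Dict.counter S).getD ch 0) : Option Char) with
      | some ch => String.mk [ch]
      | none => "same") := by
  have hkeys : (S.foldl (fun d c => d.modify c 0 (· - 1))
      (L.foldl (fun d c => d.modify c 0 (· + 1)) (PySem.Dict.empty : PySem.Dict Char Int))).keys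
      = PySem.Set.ofList (L ++ S) := by
    rw [PySem.Dict.keys_foldl_modify, PySem.Dict.keys_foldl_modify]
    simp [PySem.Set.ofList_append, PySem.Dict.keys_empty, PySem.Set.update_nil_left]
  have hval : ∀ k, (S.foldl (fun d c => d.modify c 0 (· - 1))
      (L.foldl (fun d c => d.modify c 0 (· + 1)) (PySem.Dict.empty : PySem.Dict Char Int))).getD k 0
      = (L.count k : Int) - (S.count k : Int) := by
    intro k
    rw [getD_foldl_modify_sub_one, PySem.Dict.getD_foldl_modify_add_one]
    simp
  have hfind :
      ((S.foldl (fun d c => d.modify c 0 (· - 1))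
          (L.foldl (fun d c => d.modify c 0 (· + 1)) (PySem.Dict.empty : PySem.Dict Char Int))).keys.find?
        (fun k => decide ((S.foldl (fun d c => d.modify c 0 (· - 1))
          (L.foldl (fun d c => d.modify c 0 (· + 1)) (PySem.Dict.empty : PySem.Dict Char Int))).getD k 0 ≠ 0)))
      = ((L ++ S).find? (fun ch =>
          (PySem.Dict.counter L).getD ch 0 != (PySem.Dict.counter S).getD ch 0)) := by
    rw [hkeys, find?_ofList]
    apply find?_congr
    intro x
    rw [hval, PySem.Dict.getD_counter, PySem.Dict.getD_counter]
    by_cases h : (L.count x : Int) = (S.count x : Int)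
    · simp [h]
    · simp [h, sub_ne_zero.mpr h]
  rw [hfind]

-- ===== VERDICT (by name: the statement is the Claim_ definition above) =====
theorem singleMapCounting_spec : Claim_equal_singleMapCounting := by
  intro s1 s2 _
  show singleMapCounting s1 s2 = singleMapCounting_alt s1 s2
  unfold singleMapCounting singleMapCounting_alt
  by_cases h : PySem.Str.len s1 > PySem.Str.len s2
  · simp only [h, if_pos]
    exact core s1.toList s2.toList
  · simp only [h, if_false]
    exact core s2.toList s1.toList
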